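-- pv_equiv track=rewrite | github.com/Dryjelly/coding_test_repository | 카카오코테2022/파괴되지않은건물.py | solution
-- ===== SOURCE A (Python) =====
-- def solution(board, skill):
--     answer = 0
--     new_board = [[0 for _ in range(len(board[0])+1)] for _ in range(len(board)+1)]
--
--     for s in skill:
--         s_type, r1, c1, r2, c2, degree = s
--         cal = degree
--         if s_type == 1: cal *= -1
--         new_board[r1][c1] += cal
--         new_board[r1][c2+1] += -cal
--         new_board[r2+1][c1] += -cal
--         new_board[r2+1][c2+1] += cal
--
--     for r in range(len(board)):
--         for c in range(1, len(board[0])):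
--             new_board[r][c] += new_board[r][c-1]
--
--     for r in range(1, len(board)):
--         for c in range(len(board[0])):
--             new_board[r][c] += new_board[r-1][c]
--
--     for r in range(len(board)):
--         for c in range(len(board[0])):
--             if new_board[r][c] + board[r][c] > 0: answer += 1
--     return answer
-- ===== SOURCE B (Python) =====
-- def solution(board, skill):
--     def damage(r, c):
--         total = 0
--         for s_type, r1, c1, r2, c2, degree in skill:
--             if r1 <= r <= r2 and c1 <= c <= c2:
--                 total += -degree if s_type == 1 else degree
--         return total
--     return sum(1 for r in range(len(board)) for c in range(len(board[0]))
--                if board[r][c] + damage(r, c) > 0)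
-- ===== Notes on version B (the rewrite author's own statement) =====
-- stated objective: simpler
-- what changed: Replaces A's difference-array corner updates and two prefix-sum sweeps by a direct per-cell sum of the skills whose rectangle contains the cell; Pre_ restricts to the natural domain where each skill is a rectangle lying on the board, because A's values on out-of-board or inverted rectangles (Python negative-index wraparound into the padded grid, reversed difference corners) are accidents of its difference-array encoding that no caller would specify.
-- outside the precondition, e.g. on solution([[1, 1], [1, 1]], [[1, -1, 0, 1, 1, 5]]): A returns 4, B returns 0; on solution([[1, 1, 1]], [[2, 0, 2, 0, 0, 5]]): A returns 2, B returns 3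
import Mathlib
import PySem

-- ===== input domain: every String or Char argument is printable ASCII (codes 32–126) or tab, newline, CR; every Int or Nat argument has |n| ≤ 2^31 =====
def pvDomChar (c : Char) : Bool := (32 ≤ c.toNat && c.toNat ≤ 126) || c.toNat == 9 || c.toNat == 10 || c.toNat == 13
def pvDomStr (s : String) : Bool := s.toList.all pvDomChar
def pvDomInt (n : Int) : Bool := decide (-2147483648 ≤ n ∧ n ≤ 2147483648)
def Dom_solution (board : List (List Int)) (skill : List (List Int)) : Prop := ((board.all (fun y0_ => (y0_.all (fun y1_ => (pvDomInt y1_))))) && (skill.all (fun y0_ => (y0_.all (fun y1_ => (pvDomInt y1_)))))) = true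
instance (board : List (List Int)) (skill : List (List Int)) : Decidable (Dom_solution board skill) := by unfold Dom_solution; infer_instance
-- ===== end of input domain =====

-- B replaces A's difference-array corner updates + two prefix-sum sweeps by a direct
-- per-cell sum of the skills whose rectangle contains the cell (simpler, not faster);
-- Pre_ restricts to the natural domain: each skill a rectangle lying on the board.


-- grid primitives shared by both ports: read cell (r,c), add v to cell (r,c)
def get2 (g : List (List Int)) (r c : Nat) : Int := (g.getD r []).getD c 0
def add2 (g : List (List Int)) (r c : Nat) (v : Int) : List (List Int) :=
  g.modify r (fun row => row.modify c (fun x => x + v))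
-- Python index resolution on a list of length n: negative i counts from the end.
-- Exact for -n ≤ i < n, which holds wherever A returns (and in particular on Pre_).
def widx (n : Nat) (i : Int) : Nat := (if i < 0 then i + n else i).toNat

-- ===== PORT A =====
-- 's_type, r1, c1, r2, c2, degree = s' (Pre_ guarantees len(s) = 6, where getD is exact)
-- followed by the four corner updates on the (R+1) x (C+1) difference grid
def stepSkillA (R C : Nat) (nb : List (List Int)) (s : List Int) : List (List Int) :=
  let sType := s.getD 0 0
  let r1 := s.getD 1 0
  let c1 := s.getD 2 0
  let r2 := s.getD 3 0
  let c2 := s.getD 4 0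
  let degree := s.getD 5 0
  let cal := if sType = 1 then -degree else degree
  add2 (add2 (add2 (add2 nb (widx (R + 1) r1) (widx (C + 1) c1) cal)
    (widx (R + 1) r1) (widx (C + 1) (c2 + 1)) (-cal))
    (widx (R + 1) (r2 + 1)) (widx (C + 1) c1) (-cal))
    (widx (R + 1) (r2 + 1)) (widx (C + 1) (c2 + 1)) cal

-- 'for c in range(1, len(board[0])): new_board[r][c] += new_board[r][c-1]'
def rowPassA (C : Nat) (nb : List (List Int)) (r : Nat) : List (List Int) :=
  (List.range' 1 (C - 1)).foldl (fun nb c => add2 nb r c (get2 nb r (c - 1))) nb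

-- 'for c in range(len(board[0])): new_board[r][c] += new_board[r-1][c]'
def colPassA (C : Nat) (nb : List (List Int)) (r : Nat) : List (List Int) :=
  (List.range C).foldl (fun nb c => add2 nb r c (get2 nb (r - 1) c)) nb

-- final counting loop, shared shape: val r c is the tested expression of each port
def countPos (R C : Nat) (val : Nat → Nat → Int) : Int :=
  (List.range R).foldl (fun a r =>
    (List.range C).foldl (fun a c => if val r c > 0 then a + 1 else a) a) 0

def solution (board : List (List Int)) (skill : List (List Int)) : Int :=
  let R := board.length
  let C := (board.headD []).length
  let nb0 : List (List Int) := List.replicate (R + 1) (List.replicate (C + 1) (0 : Int))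
  let nb1 := skill.foldl (stepSkillA R C) nb0
  let nb2 := (List.range R).foldl (rowPassA C) nb1
  let nb3 := (List.range' 1 (R - 1)).foldl (colPassA C) nb2
  countPos R C (fun r c => get2 nb3 r c + get2 board r c)

-- ===== PORT B =====
-- 'def damage(r, c)': fold over skill, adding the signed degree of every skill whose
-- rectangle contains (r, c)
def damageB (skill : List (List Int)) (r c : Int) : Int :=
  skill.foldl (fun total s =>
    let sType := s.getD 0 0
    let r1 := s.getD 1 0
    let c1 := s.getD 2 0
    let r2 := s.getD 3 0
    let c2 := s.getD 4 0
    let degree := s.getD 5 0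
    if r1 ≤ r ∧ r ≤ r2 ∧ c1 ≤ c ∧ c ≤ c2 then
      total + (if sType = 1 then -degree else degree)
    else total) 0

def solution_alt (board : List (List Int)) (skill : List (List Int)) : Int :=
  countPos board.length (board.headD []).length
    (fun r c => get2 board r c + damageB skill (r : Int) (c : Int))

-- ===== PRECONDITION & SPEC =====
-- Pre_ is the problem's natural domain: board nonempty, every row at least as long as
-- row 0, and each skill a 6-tuple whose rectangle lies on the board (0 ≤ r1 ≤ r2 < R,
-- 0 ≤ c1 ≤ c2 < C). It excludes inputs on which A raises (short rows, out-of-range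
-- corner indices) and also inputs with out-of-board or inverted rectangles on which A
-- still returns: there A's value comes from Python negative-index wraparound into the
-- padded difference grid or from reversed difference corners — accidents of A's
-- encoding that no caller of this function would specify.
def skillOkB (R C : Nat) (s : List Int) : Bool :=
  match s with
  | [_t, r1, c1, r2, c2, _d] =>
      decide (0 ≤ r1 ∧ r1 ≤ r2 ∧ r2 < (R : Int) ∧ 0 ≤ c1 ∧ c1 ≤ c2 ∧ c2 < (C : Int))
  | _ => false

def Pre_solution (board : List (List Int)) (skill : List (List Int)) : Prop :=
  board ≠ [] ∧
  (∀ row ∈ board, (board.headD []).length ≤ row.length) ∧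
  (∀ s ∈ skill, skillOkB board.length (board.headD []).length s = true)

instance (board : List (List Int)) (skill : List (List Int)) : Decidable (Pre_solution board skill) := by
  unfold Pre_solution; infer_instance

def pvWitness_solution : List (List Int) × List (List Int) :=
  ([[5, 5, 6], [4, 5, 5], [4, 5, 5]], [[1, 0, 0, 2, 1, 4], [2, 1, 1, 2, 2, 2]])

def Spec_solution (board : List (List Int)) (skill : List (List Int)) (out : Int) : Prop := out = solution_alt board skill
instance (board : List (List Int)) (skill : List (List Int)) (out : Int) : Decidable (Spec_solution board skill out) := by unfold Spec_solution; infer_instance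

-- ===== CLAIM (what is proved, stated in full; the proofs are below) =====
def Claim_equal_solution : Prop := ∀ (board : List (List Int)) (skill : List (List Int)), Dom_solution board skill → Pre_solution board skill → Spec_solution board skill (solution board skill)

-- ===== LEMMAS AND PROOFS =====

-- dimensions of a working grid
def Dims (g : List (List Int)) (R C : Nat) : Prop :=
  g.length = R ∧ ∀ (i : Nat) (h : i < g.length), g[i].length = C

theorem dims_replicate (R C : Nat) :
    Dims (List.replicate R (List.replicate C (0 : Int))) R C := by
  refine ⟨by simp, ?_⟩
  intro i hi
  simp

theorem get2_replicate (R C i j : Nat) :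
    get2 (List.replicate R (List.replicate C (0 : Int))) i j = 0 := by
  simp [get2, List.getD_eq_getElem?_getD, List.getElem?_replicate]
  split <;> simp

theorem dims_add2 {g : List (List Int)} {R C : Nat} (h : Dims g R C)
    (r c : Nat) (v : Int) : Dims (add2 g r c v) R C := by
  obtain ⟨h1, h2⟩ := h
  refine ⟨by simpa [add2] using h1, ?_⟩
  intro i hi
  have hi' : i < g.length := by simpa [add2] using hi
  unfold add2
  rw [List.getElem_modify]
  split <;> simp [h2 i hi']

theorem dims_foldl {β : Type} {R C : Nat} (f : List (List Int) → β → List (List Int))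
    (hf : ∀ g x, Dims g R C → Dims (f g x) R C) :
    ∀ (l : List β) (g : List (List Int)), Dims g R C → Dims (l.foldl f g) R C := by
  intro l
  induction l with
  | nil => intro g hg; simpa using hg
  | cons x xs ih => intro g hg; exact ih _ (hf _ _ hg)

theorem get2_add2_nat {g : List (List Int)} {R C : Nat} (h : Dims g R C)
    {a b : Nat} (ha : a < R) (hb : b < C) (v : Int) (i j : Nat) :
    get2 (add2 g a b v) i j = get2 g i j + if i = a ∧ j = b then v else 0 := by
  obtain ⟨hlen, hrow⟩ := h
  have hlt : a < g.length := by omega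
  have hbl : b < g[a].length := by rw [hrow a hlt]; omega
  unfold get2 add2
  by_cases hia : i = a
  · subst hia
    rw [List.getD_eq_getElem?_getD, List.getD_eq_getElem?_getD, List.getElem?_modify,
      List.getElem?_eq_getElem hlt]
    by_cases hjb : j = b
    · subst hjb
      simp [List.getD_eq_getElem?_getD, List.getElem?_modify, List.getElem?_eq_getElem hbl,
        List.getElem?_eq_getElem hlt]
    · have hjb' : b ≠ j := fun h => hjb h.symm
      simp [List.getD_eq_getElem?_getD, List.getElem?_modify, hjb', hjb,
        List.getElem?_eq_getElem hlt]
  · have hia' : a ≠ i := fun h => hia h.symm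
    rw [List.getD_eq_getElem?_getD, List.getD_eq_getElem?_getD, List.getElem?_modify]
    simp [hia', hia]

-- prefix sums of a function over 0..n
def psum (f : Nat → Int) : Nat → Int
  | 0 => f 0
  | n + 1 => psum f n + f (n + 1)

theorem psum_congr {f g : Nat → Int} : ∀ {n : Nat}, (∀ k ≤ n, f k = g k) → psum f n = psum g n := by
  intro n
  induction n with
  | zero => intro h; simpa [psum] using h 0 (by omega)
  | succ n ih => intro h; simp [psum, ih (fun k hk => h k (by omega)), h (n+1) (by omega)]

theorem psum_zero (n : Nat) : psum (fun _ => (0 : Int)) n = 0 := by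
  induction n with
  | zero => simp [psum]
  | succ n ih => simp [psum, ih]

theorem psum_add (f g : Nat → Int) (n : Nat) :
    psum (fun k => f k + g k) n = psum f n + psum g n := by
  induction n with
  | zero => simp [psum]
  | succ n ih => simp only [psum, ih]; ring

theorem psum_mul_left (a : Int) (f : Nat → Int) (n : Nat) :
    psum (fun k => a * f k) n = a * psum f n := by
  induction n with
  | zero => simp [psum]
  | succ n ih => simp only [psum, ih]; ring

-- the per-skill natural-domain bounds, unpacked from the Boolean form Pre_ carries
def SkillNat (R C : Nat) (s : List Int) : Prop :=
  s.length = 6 ∧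
  0 ≤ s.getD 1 0 ∧ s.getD 1 0 ≤ s.getD 3 0 ∧ s.getD 3 0 < (R : Int) ∧
  0 ≤ s.getD 2 0 ∧ s.getD 2 0 ≤ s.getD 4 0 ∧ s.getD 4 0 < (C : Int)

theorem skillNat_of_b {R C : Nat} {s : List Int} (h : skillOkB R C s = true) :
    SkillNat R C s := by
  rcases s with _ | ⟨t, _ | ⟨r1, _ | ⟨c1, _ | ⟨r2, _ | ⟨c2, _ | ⟨d, _ | ⟨x, rest⟩⟩⟩⟩⟩⟩⟩ <;>
    simp [skillOkB] at h
  obtain ⟨h1, h2, h3, h4, h5, h6⟩ := h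
  refine ⟨rfl, ?_, ?_, ?_, ?_, ?_, ?_⟩ <;>
    simp only [List.getD, List.getElem?_cons_zero, List.getElem?_cons_succ,
      Option.getD_some] <;> push_cast at * <;> omega

-- wrapped corner coordinates and the per-skill contribution functions:
-- G is the corner-delta grid A builds, F its 2D prefix sum (a signed-rectangle sum)
theorem widx_lt (n : Nat) (i : Int) (h1 : -(n : Int) ≤ i) (h2 : i < (n : Int)) :
    widx n i < n := by
  unfold widx
  split <;> omega

def calOf (s : List Int) : Int := if s.getD 0 0 = 1 then -(s.getD 5 0) else s.getD 5 0
def prow (R : Nat) (s : List Int) : Nat := widx (R + 1) (s.getD 1 0)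
def qrow (R : Nat) (s : List Int) : Nat := widx (R + 1) (s.getD 3 0 + 1)
def pcol (C : Nat) (s : List Int) : Nat := widx (C + 1) (s.getD 2 0)
def qcol (C : Nat) (s : List Int) : Nat := widx (C + 1) (s.getD 4 0 + 1)

def cornerInd (pr pc qr qc : Nat) (cal : Int) (i j : Nat) : Int :=
  (if i = pr ∧ j = pc then cal else 0) +
  (if i = pr ∧ j = qc then -cal else 0) +
  (if i = qr ∧ j = pc then -cal else 0) +
  (if i = qr ∧ j = qc then cal else 0)

def quadInd (p q : Nat) (v : Int) (i j : Nat) : Int :=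
  if p ≤ i ∧ q ≤ j then v else 0

def rectF (pr pc qr qc : Nat) (cal : Int) (i j : Nat) : Int :=
  quadInd pr pc cal i j + quadInd pr qc (-cal) i j +
  quadInd qr pc (-cal) i j + quadInd qr qc cal i j

def G (R C : Nat) : List (List Int) → Nat → Nat → Int
  | [], _, _ => 0
  | s :: rest, i, j =>
      cornerInd (prow R s) (pcol C s) (qrow R s) (qcol C s) (calOf s) i j + G R C rest i j

def F (R C : Nat) : List (List Int) → Nat → Nat → Int
  | [], _, _ => 0
  | s :: rest, i, j =>
      rectF (prow R s) (pcol C s) (qrow R s) (qcol C s) (calOf s) i j + F R C rest i j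

theorem psum_indNat (p : Nat) (n : Nat) :
    psum (fun k => if k = p then (1 : Int) else 0) n = if p ≤ n then 1 else 0 := by
  induction n with
  | zero => simp only [psum]; split_ifs <;> omega
  | succ n ih =>
    simp only [psum, ih]
    split_ifs <;> omega

theorem psum2_point (p q : Nat) (v : Int) (r c : Nat) :
    psum (fun t => psum (fun j => if t = p ∧ j = q then v else 0) c) r
      = quadInd p q v r c := by
  have hin : ∀ t, psum (fun j => if t = p ∧ j = q then v else 0) c
      = (v * (if t = p then (1 : Int) else 0)) * (if q ≤ c then (1 : Int) else 0) := by
    intro t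
    have he : (fun j : Nat => if t = p ∧ j = q then v else 0)
        = fun j : Nat => (v * (if t = p then (1 : Int) else 0))
            * ((fun j : Nat => if j = q then (1 : Int) else 0) j) := by
      funext j
      split_ifs <;> simp_all
    rw [he, psum_mul_left, psum_indNat]
  rw [psum_congr (fun t _ => hin t)]
  have he2 : (fun t : Nat => (v * (if t = p then (1 : Int) else 0)) * (if q ≤ c then (1 : Int) else 0))
      = fun t : Nat => (v * (if q ≤ c then (1 : Int) else 0))
          * ((fun t : Nat => if t = p then (1 : Int) else 0) t) := by
    funext t
    ring
  rw [he2, psum_mul_left, psum_indNat]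
  unfold quadInd
  split_ifs <;> (try (exfalso; omega)) <;> ring

theorem psum2_corner (pr pc qr qc : Nat) (cal : Int) (r c : Nat) :
    psum (fun t => psum (fun j => cornerInd pr pc qr qc cal t j) c) r
      = rectF pr pc qr qc cal r c := by
  have he : ∀ t : Nat, psum (fun j => cornerInd pr pc qr qc cal t j) c
      = psum (fun j => if t = pr ∧ j = pc then cal else 0) c
        + psum (fun j => if t = pr ∧ j = qc then -cal else 0) c
        + psum (fun j => if t = qr ∧ j = pc then -cal else 0) c
        + psum (fun j => if t = qr ∧ j = qc then cal else 0) c := by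
    intro t
    simp only [cornerInd]
    rw [psum_add, psum_add, psum_add]
  rw [psum_congr (fun t _ => he t), psum_add, psum_add, psum_add,
    psum2_point pr pc cal, psum2_point pr qc (-cal), psum2_point qr pc (-cal),
    psum2_point qr qc cal]
  rfl

theorem psum2_G (R C : Nat) :
    ∀ (sk : List (List Int)) (r c : Nat),
      psum (fun t => psum (fun j => G R C sk t j) c) r = F R C sk r c := by
  intro sk
  induction sk with
  | nil =>
    intro r c
    show psum (fun t => psum (fun j => (0 : Int)) c) r = 0
    rw [psum_congr (fun t _ => psum_zero c), psum_zero]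
  | cons s rest ih =>
    intro r c
    show psum (fun t => psum (fun j =>
        cornerInd (prow R s) (pcol C s) (qrow R s) (qcol C s) (calOf s) t j
          + G R C rest t j) c) r = _
    have he : ∀ t : Nat, psum (fun j =>
        cornerInd (prow R s) (pcol C s) (qrow R s) (qcol C s) (calOf s) t j
          + G R C rest t j) c
        = psum (fun j => cornerInd (prow R s) (pcol C s) (qrow R s) (qcol C s) (calOf s) t j) c
          + psum (fun j => G R C rest t j) c := fun t => psum_add _ _ c
    rw [psum_congr (fun t _ => he t), psum_add, psum2_corner, ih]
    rfl

-- step characterization: A's four corner updates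
theorem dims_stepSkillA {nb : List (List Int)} {R C : Nat}
    (hd : Dims nb (R + 1) (C + 1)) (s : List Int) :
    Dims (stepSkillA R C nb s) (R + 1) (C + 1) := by
  simp only [stepSkillA]
  exact dims_add2 (dims_add2 (dims_add2 (dims_add2 hd _ _ _) _ _ _) _ _ _) _ _ _

theorem get2_stepSkillA {nb : List (List Int)} {R C : Nat}
    (hd : Dims nb (R + 1) (C + 1)) {s : List Int} (hs : SkillNat R C s) (i j : Nat) :
    get2 (stepSkillA R C nb s) i j
      = get2 nb i j
        + cornerInd (prow R s) (pcol C s) (qrow R s) (qcol C s) (calOf s) i j := by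
  obtain ⟨hlen6, ha1, ha2, ha3, hb1, hb2, hb3⟩ := hs
  have hr1 : widx (R + 1) (s.getD 1 0) < R + 1 := widx_lt _ _ (by push_cast; omega) (by push_cast; omega)
  have hr2 : widx (R + 1) (s.getD 3 0 + 1) < R + 1 := widx_lt _ _ (by push_cast; omega) (by push_cast; omega)
  have hc1 : widx (C + 1) (s.getD 2 0) < C + 1 := widx_lt _ _ (by push_cast; omega) (by push_cast; omega)
  have hc2 : widx (C + 1) (s.getD 4 0 + 1) < C + 1 := widx_lt _ _ (by push_cast; omega) (by push_cast; omega)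
  simp only [stepSkillA]
  rw [get2_add2_nat (dims_add2 (dims_add2 (dims_add2 hd _ _ _) _ _ _) _ _ _) hr2 hc2 _ i j,
    get2_add2_nat (dims_add2 (dims_add2 hd _ _ _) _ _ _) hr2 hc1 _ i j,
    get2_add2_nat (dims_add2 hd _ _ _) hr1 hc2 _ i j,
    get2_add2_nat hd hr1 hc1 _ i j]
  unfold cornerInd prow pcol qrow qcol calOf
  ring

theorem get2_foldl_stepA {R C : Nat} :
    ∀ (sk : List (List Int)) (nb : List (List Int)), Dims nb (R + 1) (C + 1) →
      (∀ s ∈ sk, SkillNat R C s) → ∀ i j,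
      get2 (sk.foldl (stepSkillA R C) nb) i j = get2 nb i j + G R C sk i j := by
  intro sk
  induction sk with
  | nil => intro nb _ _ i j; simp [G]
  | cons s rest ih =>
    intro nb hd hok i j
    rw [List.foldl_cons,
      ih _ (dims_stepSkillA hd s) (fun s hs => hok s (List.mem_cons_of_mem _ hs)) i j,
      get2_stepSkillA hd (hok s (List.mem_cons_self ..)) i j]
    show _ = _ + (cornerInd _ _ _ _ _ i j + G R C rest i j)
    ring

theorem get2_rowfold {R C : Nat} {r : Nat} (hr : r < R + 1) :
    ∀ (k : Nat) (nb : List (List Int)), k ≤ C → Dims nb (R + 1) (C + 1) → ∀ i j,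
      get2 ((List.range' 1 k).foldl (fun nb c => add2 nb r c (get2 nb r (c - 1))) nb) i j
        = if i = r ∧ 1 ≤ j ∧ j ≤ k then psum (get2 nb r) j else get2 nb i j := by
  intro k
  induction k with
  | zero =>
    intro nb _ _ i j
    rw [if_neg (by omega)]
    rfl
  | succ k ih =>
    intro nb hk hd i j
    rw [List.range'_concat, List.foldl_append, List.foldl_cons, List.foldl_nil]
    have hdp : Dims ((List.range' 1 k).foldl (fun nb c => add2 nb r c (get2 nb r (c - 1))) nb)
        (R + 1) (C + 1) :=
      dims_foldl _ (fun g x hg => dims_add2 hg _ _ _) _ _ hd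
    have hval : get2 ((List.range' 1 k).foldl (fun nb c => add2 nb r c (get2 nb r (c - 1))) nb)
        r ((1 + 1 * k) - 1) = psum (get2 nb r) k := by
      have hik : (1 + 1 * k) - 1 = k := by omega
      rw [hik, ih nb (by omega) hd r k]
      by_cases h1 : 1 ≤ k
      · rw [if_pos ⟨rfl, h1, le_refl k⟩]
      · have : k = 0 := by omega
        subst this
        rw [if_neg (by omega)]
        rfl
    rw [get2_add2_nat hdp hr (by omega : 1 + 1 * k < C + 1) _ i j, hval,
      ih nb (by omega) hd i j]
    have hps : psum (get2 nb r) (k + 1) = psum (get2 nb r) k + get2 nb r (k + 1) := rfl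
    by_cases h2 : i = r ∧ j = 1 + 1 * k
    · rw [if_neg (show ¬(i = r ∧ 1 ≤ j ∧ j ≤ k) by omega), if_pos h2,
        if_pos (show i = r ∧ 1 ≤ j ∧ j ≤ k + 1 by omega), h2.1, show j = k + 1 by omega,
        hps]
      ring
    · by_cases h1 : i = r ∧ 1 ≤ j ∧ j ≤ k
      · rw [if_pos h1, if_neg h2, if_pos (show i = r ∧ 1 ≤ j ∧ j ≤ k + 1 by omega)]
        ring
      · rw [if_neg h1, if_neg h2, if_neg (show ¬(i = r ∧ 1 ≤ j ∧ j ≤ k + 1) by omega)]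
        ring

theorem dims_rowPassA {R C : Nat} {nb : List (List Int)} (hd : Dims nb (R + 1) (C + 1))
    (r : Nat) : Dims (rowPassA C nb r) (R + 1) (C + 1) :=
  dims_foldl _ (fun g x hg => dims_add2 hg _ _ _) _ _ hd

theorem dims_colPassA {R C : Nat} {nb : List (List Int)} (hd : Dims nb (R + 1) (C + 1))
    (r : Nat) : Dims (colPassA C nb r) (R + 1) (C + 1) :=
  dims_foldl _ (fun g x hg => dims_add2 hg _ _ _) _ _ hd

-- the whole first sweep: rows 0..m-1 prefix-summed along columns
theorem get2_rowsweep {R C : Nat} :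
    ∀ (m : Nat) (nb : List (List Int)), m ≤ R → Dims nb (R + 1) (C + 1) → ∀ i j,
      get2 ((List.range m).foldl (rowPassA C) nb) i j
        = if i < m ∧ 1 ≤ j ∧ j ≤ C - 1 then psum (get2 nb i) j else get2 nb i j := by
  intro m
  induction m with
  | zero =>
    intro nb _ _ i j
    rw [if_neg (by omega)]
    rfl
  | succ m ih =>
    intro nb hm hd i j
    rw [List.range_succ, List.foldl_append, List.foldl_cons, List.foldl_nil]
    have hdp : Dims ((List.range m).foldl (rowPassA C) nb) (R + 1) (C + 1) :=
      dims_foldl _ (fun g x hg => dims_rowPassA hg x) _ _ hd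
    rw [show rowPassA C ((List.range m).foldl (rowPassA C) nb) m
        = (List.range' 1 (C - 1)).foldl
            (fun nb c => add2 nb m c (get2 nb m (c - 1)))
            ((List.range m).foldl (rowPassA C) nb) from rfl,
      get2_rowfold (by omega : m < R + 1) (C - 1) _ (by omega) hdp i j]
    by_cases h2 : i = m ∧ 1 ≤ j ∧ j ≤ C - 1
    · rw [if_pos h2, if_pos (show i < m + 1 ∧ 1 ≤ j ∧ j ≤ C - 1 by omega)]
      refine psum_congr (fun t ht => ?_)
      rw [ih nb (by omega) hd m t, if_neg (by omega), h2.1]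
    · rw [if_neg h2, ih nb (by omega) hd i j]
      by_cases h1 : i < m ∧ 1 ≤ j ∧ j ≤ C - 1
      · rw [if_pos h1, if_pos (show i < m + 1 ∧ 1 ≤ j ∧ j ≤ C - 1 by omega)]
      · rw [if_neg h1, if_neg (show ¬(i < m + 1 ∧ 1 ≤ j ∧ j ≤ C - 1) by omega)]

-- one pass of the second sweep: row r gets row r-1 added, columns 0..m-1
theorem get2_colfold {R C : Nat} {r : Nat} (hr1 : 1 ≤ r) (hr : r < R + 1) :
    ∀ (m : Nat) (nb : List (List Int)), m ≤ C → Dims nb (R + 1) (C + 1) → ∀ i j,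
      get2 ((List.range m).foldl (fun nb c => add2 nb r c (get2 nb (r - 1) c)) nb) i j
        = if i = r ∧ j < m then get2 nb i j + get2 nb (r - 1) j else get2 nb i j := by
  intro m
  induction m with
  | zero =>
    intro nb _ _ i j
    rw [if_neg (by omega)]
    rfl
  | succ m ih =>
    intro nb hm hd i j
    rw [List.range_succ, List.foldl_append, List.foldl_cons, List.foldl_nil]
    have hdp : Dims ((List.range m).foldl (fun nb c => add2 nb r c (get2 nb (r - 1) c)) nb)
        (R + 1) (C + 1) :=
      dims_foldl _ (fun g x hg => dims_add2 hg _ _ _) _ _ hd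
    have hread : get2 ((List.range m).foldl (fun nb c => add2 nb r c (get2 nb (r - 1) c)) nb)
        (r - 1) m = get2 nb (r - 1) m := by
      rw [ih nb (by omega) hd (r - 1) m, if_neg (by omega)]
    rw [get2_add2_nat hdp hr (by omega : m < C + 1) _ i j, hread,
      ih nb (by omega) hd i j]
    by_cases h2 : i = r ∧ j = m
    · rw [if_neg (by omega), if_pos h2, if_pos (show i = r ∧ j < m + 1 by omega), h2.2]
    · by_cases h1 : i = r ∧ j < m
      · rw [if_pos h1, if_neg h2, if_pos (show i = r ∧ j < m + 1 by omega)]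
        ring
      · rw [if_neg h1, if_neg h2, if_neg (show ¬(i = r ∧ j < m + 1) by omega)]
        ring

-- the whole second sweep: rows 1..k column-prefix-summed (reads only need j < C)
theorem get2_colsweep {R C : Nat} :
    ∀ (k : Nat) (nb : List (List Int)), k ≤ R - 1 → Dims nb (R + 1) (C + 1) →
      ∀ i j, j < C →
      get2 ((List.range' 1 k).foldl (colPassA C) nb) i j
        = if 1 ≤ i ∧ i ≤ k then psum (fun t => get2 nb t j) i else get2 nb i j := by
  intro k
  induction k with
  | zero =>
    intro nb _ _ i j _
    rw [if_neg (by omega)]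
    rfl
  | succ k ih =>
    intro nb hk hd i j hj
    rw [List.range'_concat, List.foldl_append, List.foldl_cons, List.foldl_nil]
    have hdp : Dims ((List.range' 1 k).foldl (colPassA C) nb) (R + 1) (C + 1) :=
      dims_foldl _ (fun g x hg => dims_colPassA hg x) _ _ hd
    rw [show colPassA C ((List.range' 1 k).foldl (colPassA C) nb) (1 + 1 * k)
        = (List.range C).foldl
            (fun nb c => add2 nb (1 + 1 * k) c (get2 nb ((1 + 1 * k) - 1) c))
            ((List.range' 1 k).foldl (colPassA C) nb) from rfl,
      get2_colfold (by omega) (by omega : 1 + 1 * k < R + 1) C _ (le_refl C) hdp i j]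
    have hprev : get2 ((List.range' 1 k).foldl (colPassA C) nb) ((1 + 1 * k) - 1) j
        = psum (fun t => get2 nb t j) k := by
      rw [show (1 + 1 * k) - 1 = k by omega, ih nb (by omega) hd k j hj]
      by_cases h1 : 1 ≤ k
      · rw [if_pos ⟨h1, le_refl k⟩]
      · rw [if_neg (by omega), show k = 0 by omega]
        rfl
    have hps : psum (fun t => get2 nb t j) (k + 1)
        = psum (fun t => get2 nb t j) k + get2 nb (k + 1) j := rfl
    by_cases h2 : i = 1 + 1 * k
    · rw [if_pos (show i = 1 + 1 * k ∧ j < C by omega), hprev,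
        ih nb (by omega) hd i j hj, if_neg (by omega),
        if_pos (show 1 ≤ i ∧ i ≤ k + 1 by omega), show i = k + 1 by omega, hps]
      ring
    · rw [if_neg (by omega), ih nb (by omega) hd i j hj]
      by_cases h1 : 1 ≤ i ∧ i ≤ k
      · rw [if_pos h1, if_pos (show 1 ≤ i ∧ i ≤ k + 1 by omega)]
      · rw [if_neg h1, if_neg (show ¬(1 ≤ i ∧ i ≤ k + 1) by omega)]

theorem countPos_congr {R C : Nat} {f g : Nat → Nat → Int}
    (h : ∀ r < R, ∀ c < C, f r c = g r c) : countPos R C f = countPos R C g := by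
  unfold countPos
  apply PySem.List.foldl_congr_mem
  intro acc r hr
  apply PySem.List.foldl_congr_mem
  intro acc' c hc
  rw [h r (List.mem_range.mp hr) c (List.mem_range.mp hc)]

-- A's final grid value on the board region is the signed-rectangle sum F
theorem Aval {R C : Nat} (sk : List (List Int)) (nb0 : List (List Int))
    (hd0 : Dims nb0 (R + 1) (C + 1)) (h0 : ∀ i j, get2 nb0 i j = 0)
    (hok : ∀ s ∈ sk, SkillNat R C s)
    (r c : Nat) (hr : r < R) (hc : c < C) :
    get2 ((List.range' 1 (R - 1)).foldl (colPassA C)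
        ((List.range R).foldl (rowPassA C) (sk.foldl (stepSkillA R C) nb0))) r c
      = F R C sk r c := by
  have hd1 : Dims (sk.foldl (stepSkillA R C) nb0) (R + 1) (C + 1) :=
    dims_foldl _ (fun g x hg => dims_stepSkillA hg x) _ _ hd0
  have hd2 : Dims ((List.range R).foldl (rowPassA C) (sk.foldl (stepSkillA R C) nb0))
      (R + 1) (C + 1) :=
    dims_foldl _ (fun g x hg => dims_rowPassA hg x) _ _ hd1
  have h1 : ∀ i j, get2 (sk.foldl (stepSkillA R C) nb0) i j = G R C sk i j := by
    intro i j
    rw [get2_foldl_stepA sk nb0 hd0 hok i j, h0]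
    ring
  have h2 : ∀ t, t < R → ∀ u, u < C →
      get2 ((List.range R).foldl (rowPassA C) (sk.foldl (stepSkillA R C) nb0)) t u
        = psum (fun v => G R C sk t v) u := by
    intro t ht u hu
    rw [get2_rowsweep R _ (le_refl R) hd1 t u]
    by_cases h : 1 ≤ u
    · rw [if_pos ⟨ht, h, by omega⟩]
      exact psum_congr (fun k _ => h1 t k)
    · rw [if_neg (by omega), show u = 0 by omega]
      exact h1 t 0
  have h3 : get2 ((List.range' 1 (R - 1)).foldl (colPassA C)
      ((List.range R).foldl (rowPassA C) (sk.foldl (stepSkillA R C) nb0))) r c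
      = psum (fun t => psum (fun v => G R C sk t v) c) r := by
    rw [get2_colsweep (R - 1) _ (le_refl _) hd2 r c hc]
    by_cases h : 1 ≤ r
    · rw [if_pos ⟨h, by omega⟩]
      exact psum_congr (fun t ht => h2 t (by omega) c hc)
    · rw [if_neg (by omega), show r = 0 by omega]
      exact h2 0 (by omega) c hc
  rw [h3, psum2_G R C sk r c]

-- on the natural domain the signed-rectangle sum is the plain containment indicator
theorem rectF_eq_contain {R C : Nat} {s : List Int} (hs : SkillNat R C s) (i j : Nat) :
    rectF (prow R s) (pcol C s) (qrow R s) (qcol C s) (calOf s) i j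
      = if s.getD 1 0 ≤ (i : Int) ∧ (i : Int) ≤ s.getD 3 0 ∧
            s.getD 2 0 ≤ (j : Int) ∧ (j : Int) ≤ s.getD 4 0
        then calOf s else 0 := by
  obtain ⟨_, ha1, ha2, ha3, hb1, hb2, hb3⟩ := hs
  unfold rectF quadInd prow qrow pcol qcol widx
  rw [if_neg (show ¬ s.getD 1 0 < 0 by omega), if_neg (show ¬ s.getD 3 0 + 1 < 0 by omega),
    if_neg (show ¬ s.getD 2 0 < 0 by omega), if_neg (show ¬ s.getD 4 0 + 1 < 0 by omega)]
  split_ifs <;> omega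

-- B's damage fold computes F on the natural domain
theorem damageB_eq_F {R C : Nat} :
    ∀ (sk : List (List Int)), (∀ s ∈ sk, SkillNat R C s) → ∀ (i j : Nat) (t : Int),
      sk.foldl (fun total s =>
        if s.getD 1 0 ≤ (i : Int) ∧ (i : Int) ≤ s.getD 3 0 ∧
            s.getD 2 0 ≤ (j : Int) ∧ (j : Int) ≤ s.getD 4 0 then
          total + (if s.getD 0 0 = 1 then -(s.getD 5 0) else s.getD 5 0)
        else total) t
        = t + F R C sk i j := by
  intro sk
  induction sk with
  | nil => intro _ i j t; simp [F]
  | cons s rest ih =>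
    intro hok i j t
    rw [List.foldl_cons, ih (fun s hs => hok s (List.mem_cons_of_mem _ hs)) i j]
    show _ = t + (rectF (prow R s) (pcol C s) (qrow R s) (qcol C s) (calOf s) i j
      + F R C rest i j)
    rw [rectF_eq_contain (hok s (List.mem_cons_self ..)) i j]
    unfold calOf
    split_ifs <;> ring

-- ===== VERDICT (by name: the statement is the Claim_ definition above) =====
theorem solution_spec : Claim_equal_solution := by
  intro board skill _ hpre
  obtain ⟨hne, hrows, hsk⟩ := hpre
  unfold Spec_solution
  show solution board skill = solution_alt board skill
  simp only [solution, solution_alt]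
  apply countPos_congr
  intro r hr c hc
  have hok : ∀ s ∈ skill, SkillNat board.length (board.headD []).length s :=
    fun s hs => skillNat_of_b (hsk s hs)
  rw [Aval skill _ (dims_replicate (board.length + 1) ((board.headD []).length + 1))
      (fun i j => get2_replicate _ _ i j) hok r c hr hc]
  show _ = get2 board r c + damageB skill (r : Int) (c : Int)
  unfold damageB
  rw [damageB_eq_F skill hok r c 0]
  ring
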